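-- pv_equiv track=rewrite | github.com/chongsun2002/habitbot | bot/db/db_utils.py | streak_to_points
-- ===== SOURCE A (Python) =====
-- def streak_to_points(streak: str) -> int:
--     """
--     Calculates points for a streak based on:
--     - A streak is broken by two consecutive '0's.
--     - Streaks are evaluated in 2-day windows (only one '1' needed per 2 days).
--     - A consecutive '1' does not add extra points.
--
--     Args:
--         streak (str): A string of '1's and '0's representing user activity.
--
--     Returns:
--         int: Total streak points.
--     """
--     segments = streak.split("00")
--     total_points = 0
--
--     for segment in segments:
--         if not segment:  # Skip empty segments.
--             continue
--         # Calculate the number of 2-day windows in this segment.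
--         # Using ceiling division: (len(segment) + 1) // 2
--         windows = (len(segment) + 1) // 2
--
--         # The points for this segment is the triangular number T(windows)
--         segment_points = windows * (windows + 1) // 2
--
--         total_points += segment_points
--
--     return total_points
-- ===== SOURCE B (Python) =====
-- def streak_to_points(streak: str) -> int:
--     # Character-by-character state machine with incremental triangular
--     # accumulation: no splitting and no w*(w+1)//2 formula. Each time the
--     # current segment's 2-day window count grows (segment length goes from
--     # even to odd) the new window index w is added, so 1+2+...+w = T(w)
--     # accumulates on the fly. A lone '0' is held pending: a second '0' is a
--     # break (the pending pair is discarded, the segment state resets);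
--     # anything else commits the pending '0' as an ordinary segment character.
--     def bump(total, w, odd):
--         # extend the current segment by one character
--         if not odd:
--             w += 1
--             total += w
--         return total, w, not odd
--
--     total = 0
--     w = 0          # windows opened in the current segment
--     odd = False    # current segment length is odd
--     z = False      # one '0' pending (possible start of a break)
--     for c in streak:
--         if c == '0':
--             if z:
--                 w = 0
--                 odd = False
--                 z = False
--             else:
--                 z = True
--         else:
--             if z:
--                 total, w, odd = bump(total, w, odd)
--                 z = False
--             total, w, odd = bump(total, w, odd)
--     if z:
--         total, w, odd = bump(total, w, odd)
--     return total
-- ===== Notes on version B (the rewrite author's own statement) =====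
-- stated objective: alternative
-- what changed: Replaces str.split('00') plus per-segment closed-form points w*(w+1)//2 by a character-by-character state machine with a pending-zero flag that accumulates triangular points incrementally (adds the new window index each time the segment length goes even->odd), so neither the delimiter split nor the triangular formula appears.
import Mathlib
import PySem

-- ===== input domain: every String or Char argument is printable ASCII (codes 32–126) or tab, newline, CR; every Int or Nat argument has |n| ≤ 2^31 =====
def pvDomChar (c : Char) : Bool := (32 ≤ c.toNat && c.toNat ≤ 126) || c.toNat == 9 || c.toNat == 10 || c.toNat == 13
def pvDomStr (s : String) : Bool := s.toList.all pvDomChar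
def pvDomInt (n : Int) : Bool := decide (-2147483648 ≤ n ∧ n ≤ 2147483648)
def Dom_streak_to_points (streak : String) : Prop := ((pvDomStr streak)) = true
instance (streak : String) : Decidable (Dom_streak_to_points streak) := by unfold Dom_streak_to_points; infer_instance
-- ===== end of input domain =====

-- B replaces str.split("00") + the per-segment w*(w+1)//2 formula by a character-by-character
-- state machine with a pending-zero flag that accumulates triangular points incrementally
-- (alternative decomposition, same O(n) cost).


-- ===== PORT A =====
def streak_to_points (streak : String) : Int :=
  let segments := (PySem.Str.split? streak "00").getD []
  segments.foldl
    (fun total segment =>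
      if segment = "" then total  -- skip empty segments
      else
        let windows := PySem.Int.floordiv (PySem.Str.len segment + 1) 2
        let segment_points := PySem.Int.floordiv (windows * (windows + 1)) 2
        total + segment_points)
    0

-- ===== PORT B =====
-- Source B's helper `bump`: extend the current segment by one character
def pvBump (total w : Int) (odd : Bool) : Int × Int × Bool :=
  if !odd then (total + (w + 1), w + 1, true) else (total, w, false)

-- the body of Source B's for-loop; state = (total, w, odd, z)
def pvStep (st : Int × Int × Bool × Bool) (c : Char) : Int × Int × Bool × Bool :=
  match st with
  | (total, w, odd, z) =>
    if c = '0' then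
      if z then (total, 0, false, false) else (total, w, odd, true)
    else
      match (if z then pvBump total w odd else (total, w, odd)) with
      | (total, w, odd) =>
        match pvBump total w odd with
        | (total, w, odd) => (total, w, odd, false)

def streak_to_points_alt (streak : String) : Int :=
  match streak.toList.foldl pvStep (0, 0, false, false) with
  | (total, w, odd, z) => if z then (pvBump total w odd).1 else total

-- ===== PRECONDITION & SPEC =====
def Spec_streak_to_points (streak : String) (out : Int) : Prop := out = streak_to_points_alt streak
instance (streak : String) (out : Int) : Decidable (Spec_streak_to_points streak out) := by unfold Spec_streak_to_points; infer_instance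

-- ===== CLAIM (what is proved, stated in full; the proofs are below) =====
def Claim_equal_streak_to_points : Prop := ∀ (streak : String), Dom_streak_to_points streak → Spec_streak_to_points streak (streak_to_points streak)

-- ===== LEMMAS AND PROOFS =====

-- A-side triangular points of one segment of length cur (floordiv form, as A computes them)
def pvTri (cur : Nat) : Int :=
  PySem.Int.floordiv
    (PySem.Int.floordiv ((cur : Int) + 1) 2 * (PySem.Int.floordiv ((cur : Int) + 1) 2 + 1)) 2

-- the same value, Nat-division form, plus the window count and parity of a segment length
def pvTriN (cur : Nat) : Int := ((((cur + 1) / 2) * ((cur + 1) / 2 + 1) / 2 : Nat) : Int)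
def pvW (cur : Nat) : Int := (((cur + 1) / 2 : Nat) : Int)
def pvOdd (cur : Nat) : Bool := decide (cur % 2 = 1)

lemma pvTri_eq_triN (cur : Nat) : pvTri cur = pvTriN cur := by
  unfold pvTri pvTriN
  have h1 : ((cur : Int) + 1) = (((cur + 1 : Nat) : Int)) := by push_cast; ring
  rw [h1]
  have h2 : PySem.Int.floordiv (((cur + 1 : Nat) : Int)) 2 = (((cur + 1) / 2 : Nat) : Int) := by
    exact_mod_cast PySem.Int.floordiv_natCast (cur + 1) 2
  rw [h2]
  have h3 : (((cur + 1) / 2 : Nat) : Int) * ((((cur + 1) / 2 : Nat) : Int) + 1)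
      = (((cur + 1) / 2 * ((cur + 1) / 2 + 1) : Nat) : Int) := by push_cast; ring
  rw [h3]
  exact_mod_cast PySem.Int.floordiv_natCast ((cur + 1) / 2 * ((cur + 1) / 2 + 1)) 2

-- reference scan, consuming the list with a two-character lookahead (bridges A's split)
def pvScan : List Char → Nat → Int
  | [], cur => pvTri cur
  | c :: rest, cur =>
    if (c :: rest).take 2 = ['0', '0'] then pvTri cur + pvScan ((c :: rest).drop 2) 0
    else pvScan rest (cur + 1)
termination_by l _ => l.length

def pvSegPts (seg : List Char) : Int := pvTri seg.length

lemma pvPrefix_iff (l : List Char) :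
    (['0', '0'] : List Char).isPrefixOf l = true ↔ l.take 2 = ['0', '0'] := by
  rw [List.isPrefixOf_iff_prefix, List.prefix_iff_eq_take]
  constructor <;> (intro h; exact h.symm)

lemma pvGo_sum (fuel : Nat) (l cur : List Char) (acc : List (List Char))
    (h : l.length < fuel) :
    ((PySem.Chars.splitOn.go ['0', '0'] fuel l cur acc).map pvSegPts).sum
      = (acc.map pvSegPts).sum + pvScan l cur.length := by
  induction fuel generalizing l cur acc with
  | zero => omega
  | succ fuel ih =>
    cases l with
    | nil =>
      simp [PySem.Chars.splitOn.go, pvScan, pvSegPts]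
    | cons c rest =>
      rw [PySem.Chars.splitOn.go]
      by_cases hp : (['0', '0'] : List Char).isPrefixOf (c :: rest) = true
      · rw [if_pos hp]
        have htake : (c :: rest).take 2 = ['0', '0'] := (pvPrefix_iff _).mp hp
        have hlen : ((c :: rest).drop 2).length < fuel := by
          simp at h ⊢; omega
        have h20 : (['0', '0'] : List Char).length = 2 := rfl
        rw [h20, ih _ _ _ hlen, pvScan, if_pos htake]
        simp [pvSegPts]
        ring
      · rw [if_neg hp]
        have htake : ¬ ((c :: rest).take 2 = ['0', '0']) := fun hc => hp ((pvPrefix_iff _).mpr hc)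
        have hlen : rest.length < fuel := by simp at h; omega
        rw [ih _ _ _ hlen, pvScan, if_neg htake]
        simp

lemma pvFoldl_sum (segs : List (List Char)) (t : Int) :
    (segs.map String.ofList).foldl
      (fun total segment =>
        if segment = "" then total
        else
          let windows := PySem.Int.floordiv (PySem.Str.len segment + 1) 2
          let segment_points := PySem.Int.floordiv (windows * (windows + 1)) 2
          total + segment_points) t
      = t + (segs.map pvSegPts).sum := by
  induction segs generalizing t with
  | nil => simp
  | cons seg rest ih =>
    simp only [List.map_cons, List.foldl_cons, ih, List.sum_cons]
    by_cases hseg : seg = []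
    · subst hseg
      simp [pvSegPts, pvTri]
    · have hne : String.ofList seg ≠ "" := by
        intro hc
        apply hseg
        have : (String.ofList seg).toList = ("" : String).toList := by rw [hc]
        simpa using this
      rw [if_neg hne]
      simp only [pvSegPts, pvTri, PySem.Str.len]
      simp
      ring_nf

-- B-side reference scan: one character at a time, z = pending '0'
def pvFG : List Char → Nat → Bool → Int
  | [], cur, false => pvTriN cur
  | [], cur, true => pvTriN (cur + 1)
  | c :: rest, cur, false => if c = '0' then pvFG rest cur true else pvFG rest (cur + 1) false
  | c :: rest, cur, true =>
      if c = '0' then pvTriN cur + pvFG rest 0 false else pvFG rest (cur + 2) false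
termination_by l _ _ => l.length

-- arithmetic: how window count, parity and triangular points grow with one more character
lemma pvOdd_succ (cur : Nat) : pvOdd (cur + 1) = !pvOdd cur := by
  by_cases h : cur % 2 = 1 <;> simp [pvOdd, h] <;> omega

lemma pvW_succ (cur : Nat) : pvW (cur + 1) = if pvOdd cur then pvW cur else pvW cur + 1 := by
  unfold pvW pvOdd
  by_cases h : cur % 2 = 1
  · rw [if_pos (by simpa using h)]
    exact congrArg _ (by omega)
  · rw [if_neg (by simpa using h)]
    have hk : (cur + 1 + 1) / 2 = (cur + 1) / 2 + 1 := by omega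
    rw [hk]; push_cast; ring

lemma pvTriN_succ (cur : Nat) :
    pvTriN (cur + 1) = if pvOdd cur then pvTriN cur else pvTriN cur + (pvW cur + 1) := by
  unfold pvTriN pvW pvOdd
  by_cases h : cur % 2 = 1
  · rw [if_pos (by simpa using h)]
    have hk : (cur + 1 + 1) / 2 = (cur + 1) / 2 := by omega
    rw [hk]
  · rw [if_neg (by simpa using h)]
    have hk : (cur + 1 + 1) / 2 = (cur + 1) / 2 + 1 := by omega
    rw [hk]
    have hd : 2 ∣ ((cur + 1) / 2) * ((cur + 1) / 2 + 1) :=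
      (Nat.even_mul_succ_self ((cur + 1) / 2)).two_dvd
    have he : ((cur + 1) / 2 + 1) * ((cur + 1) / 2 + 1 + 1)
        = ((cur + 1) / 2) * ((cur + 1) / 2 + 1) + 2 * ((cur + 1) / 2 + 1) := by ring
    have h3 : ((cur + 1) / 2 + 1) * ((cur + 1) / 2 + 1 + 1) / 2
        = ((cur + 1) / 2) * ((cur + 1) / 2 + 1) / 2 + ((cur + 1) / 2 + 1) := by
      rw [he]
      generalize ((cur + 1) / 2) * ((cur + 1) / 2 + 1) = m at hd ⊢
      omega
    rw [h3]; push_cast; ring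

lemma pvBump_spec (t : Int) (cur : Nat) :
    pvBump t (pvW cur) (pvOdd cur)
      = (t + (pvTriN (cur + 1) - pvTriN cur), pvW (cur + 1), pvOdd (cur + 1)) := by
  cases hodd : pvOdd cur <;>
    simp [pvBump, hodd, pvW_succ, pvTriN_succ, pvOdd_succ]

-- result extraction after the loop (the 'if z: bump' tail of Source B)
def pvOut (st : Int × Int × Bool × Bool) : Int :=
  match st with
  | (total, w, odd, z) => if z then (pvBump total w odd).1 else total

lemma pvFold_eq_FG (l : List Char) (t : Int) (cur : Nat) (z : Bool) :
    pvOut (l.foldl pvStep (t, pvW cur, pvOdd cur, z)) = t - pvTriN cur + pvFG l cur z := by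
  induction l generalizing t cur z with
  | nil =>
    cases z with
    | false => simp [pvOut, pvFG]
    | true =>
      have hb := pvBump_spec t cur
      simp [pvOut, pvFG, hb]
      ring
  | cons c rest ih =>
    rw [List.foldl_cons]
    by_cases hc : c = '0'
    · subst hc
      cases z with
      | false =>
        have : pvStep (t, pvW cur, pvOdd cur, false) '0' = (t, pvW cur, pvOdd cur, true) := by
          simp [pvStep]
        rw [this, ih t cur true, pvFG]
        simp
      | true =>
        have : pvStep (t, pvW cur, pvOdd cur, true) '0' = (t, pvW 0, pvOdd 0, false) := by
          simp [pvStep, pvW, pvOdd]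
        rw [this, ih t 0 false, pvFG]
        simp [pvTriN]
        ring
    · cases z with
      | false =>
        have : pvStep (t, pvW cur, pvOdd cur, false) c
            = (t + (pvTriN (cur + 1) - pvTriN cur), pvW (cur + 1), pvOdd (cur + 1), false) := by
          simp [pvStep, hc, pvBump_spec t cur]
        rw [this, ih _ (cur + 1) false, pvFG, if_neg hc]
        ring
      | true =>
        have hb2 := pvBump_spec (t + (pvTriN (cur + 1) - pvTriN cur)) (cur + 1)
        have : pvStep (t, pvW cur, pvOdd cur, true) c
            = (t + (pvTriN (cur + 2) - pvTriN cur), pvW (cur + 2), pvOdd (cur + 2), false) := by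
          simp [pvStep, hc, pvBump_spec t cur, hb2]
          ring
        rw [this, ih _ (cur + 2) false, pvFG, if_neg hc]
        ring

lemma pvScan_eq_FG : ∀ (n : Nat) (l : List Char) (cur : Nat), l.length ≤ n →
    pvScan l cur = pvFG l cur false := by
  intro n
  induction n with
  | zero =>
    intro l cur h
    have : l = [] := List.eq_nil_of_length_eq_zero (by omega)
    subst this
    simp [pvScan, pvFG, pvTri_eq_triN]
  | succ n ih =>
    intro l cur h
    match l with
    | [] => simp [pvScan, pvFG, pvTri_eq_triN]
    | c :: rest =>
      by_cases hc : c = '0'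
      · subst hc
        match rest with
        | [] =>
          rw [pvScan, if_neg (by decide), pvScan, pvFG, if_pos rfl, pvFG]
          exact pvTri_eq_triN _
        | d :: r2 =>
          by_cases hd : d = '0'
          · subst hd
            rw [pvScan, if_pos (by simp), pvFG, if_pos rfl, pvFG, if_pos rfl]
            simp only [List.drop_succ_cons, List.drop_zero]
            rw [ih r2 0 (by simp at h; omega), pvTri_eq_triN]
          · rw [pvScan, if_neg (by simp [hd]), pvScan, if_neg (by simp [hd]),
                pvFG, if_pos rfl, pvFG, if_neg hd]
            exact ih r2 (cur + 2) (by simp at h; omega)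
      · rw [pvScan, if_neg (by simp [hc]), pvFG, if_neg hc]
        exact ih rest (cur + 1) (by simp at h; omega)

-- ===== VERDICT (by name: the statement is the Claim_ definition above) =====
theorem streak_to_points_spec : Claim_equal_streak_to_points := by
  intro streak _
  unfold Spec_streak_to_points streak_to_points streak_to_points_alt
  have hsplit : PySem.Str.split? streak "00"
      = some ((PySem.Chars.splitOn streak.toList ['0', '0']).map String.ofList) := by
    simp [PySem.Str.split?, PySem.Chars.split?]
  rw [hsplit]
  simp only [Option.getD_some]
  rw [pvFoldl_sum]
  unfold PySem.Chars.splitOn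
  rw [pvGo_sum (streak.toList.length + 1) _ _ _ (by omega)]
  simp only [List.map_nil, List.sum_nil, List.length_nil, zero_add]
  have halt : pvOut (streak.toList.foldl pvStep ((0 : Int), (0 : Int), false, false))
      = pvFG streak.toList 0 false := by
    rw [show ((0 : Int), (0 : Int), false, false) = ((0 : Int), pvW 0, pvOdd 0, false) by
      simp [pvW, pvOdd]]
    rw [pvFold_eq_FG streak.toList 0 0 false]
    simp [pvTriN]
  rw [pvScan_eq_FG streak.toList.length _ _ le_rfl]
  exact halt.symm
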